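-- pv_equiv track=rewrite | github.com/lukebakken/queens-attack-2 | hackerrank/queens-attack-2/queens_attack.py | partition_obst
-- ===== SOURCE A (Python) =====
-- n_m = (1, 0)
--
-- e_m = (0, 1)
--
-- s_m = (-1, 0)
--
-- w_m = (0, -1)
--
-- ne_m = (1, 1)
--
-- nw_m = (1, -1)
--
-- se_m = (-1, 1)
--
-- sw_m = (-1, -1)
--
-- motions = [n_m, ne_m, nw_m, s_m, se_m, sw_m, e_m, w_m]
--
-- def partition_obst(q_pos, obst):
--     q_r = q_pos[0]
--     q_c = q_pos[1]
--
--     obst_by_m = {}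
--     for m in motions:
--         obst_by_m[m] = []
--
--     for o in obst:
--         o_r = o[0]
--         o_c = o[1]
--         if o_r == q_r and o_c > q_c:
--             obst_by_m[e_m].append(o)
--         elif o_r == q_r and o_c < q_c:
--             obst_by_m[w_m].append(o)
--         elif o_c == q_c and o_r > q_r:
--             obst_by_m[n_m].append(o)
--         elif o_c == q_c and o_r < q_r:
--             obst_by_m[s_m].append(o)
--         elif o_c > q_c and o_r > q_r:
--             obst_by_m[ne_m].append(o)
--         elif o_c < q_c and o_r > q_r:
--             obst_by_m[nw_m].append(o)
--         elif o_c > q_c and o_r < q_r: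
--             obst_by_m[se_m].append(o)
--         elif o_c < q_c and o_r < q_r:
--             obst_by_m[sw_m].append(o)
--
--     return obst_by_m
-- ===== SOURCE B (Python) =====
-- n_m = (1, 0)
-- e_m = (0, 1)
-- s_m = (-1, 0)
-- w_m = (0, -1)
-- ne_m = (1, 1)
-- nw_m = (1, -1)
-- se_m = (-1, 1)
-- sw_m = (-1, -1)
--
-- motions = [n_m, ne_m, nw_m, s_m, se_m, sw_m, e_m, w_m]
--
-- def partition_obst(q_pos, obst):
--     q_r, q_c = q_pos
--
--     def key(o):
--         return ((o[0] > q_r) - (o[0] < q_r), (o[1] > q_c) - (o[1] < q_c))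
--
--     return {m: [o for o in obst if key(o) == m] for m in motions}
-- ===== Notes on version B (the rewrite author's own statement) =====
-- stated objective: simpler
-- what changed: Replaces the 8-way if/elif dispatch loop that mutates dict buckets with a dict comprehension that, for each direction, selects its obstacles by a direct sign-key filter.
import Mathlib
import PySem

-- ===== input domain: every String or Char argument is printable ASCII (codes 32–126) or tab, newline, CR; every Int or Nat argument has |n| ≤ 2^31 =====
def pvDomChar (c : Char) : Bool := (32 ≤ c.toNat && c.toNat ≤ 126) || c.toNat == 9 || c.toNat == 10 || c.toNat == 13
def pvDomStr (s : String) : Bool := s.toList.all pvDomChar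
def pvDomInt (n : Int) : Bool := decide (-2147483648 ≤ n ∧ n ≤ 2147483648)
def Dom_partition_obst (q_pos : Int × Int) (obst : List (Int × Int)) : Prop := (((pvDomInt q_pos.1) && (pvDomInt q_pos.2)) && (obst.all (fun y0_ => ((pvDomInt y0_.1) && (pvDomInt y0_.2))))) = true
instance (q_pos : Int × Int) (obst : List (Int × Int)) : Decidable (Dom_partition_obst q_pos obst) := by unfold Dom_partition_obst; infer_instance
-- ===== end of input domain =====

-- B replaces A's single dispatch loop (8-way if/elif ladder mutating dict buckets)
-- by a dict comprehension that selects each direction's obstacles with a sign-key filter; objective: simpler.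

-- ===== PORT A =====
-- module-level constants: motions = [n_m, ne_m, nw_m, s_m, se_m, sw_m, e_m, w_m]
def pyMotions : List (Int × Int) :=
  [(1, 0), (1, 1), (1, -1), (-1, 0), (-1, 1), (-1, -1), (0, 1), (0, -1)]

-- one iteration of A's obstacle loop: the if/elif ladder; obst_by_m[k].append(o) = modify k (· ++ [o])
def stepA (q_r q_c : Int) (d : PySem.Dict (Int × Int) (List (Int × Int))) (o : Int × Int) :
    PySem.Dict (Int × Int) (List (Int × Int)) :=
  if o.1 = q_r ∧ o.2 > q_c then d.modify (0, 1) [] (· ++ [o])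
  else if o.1 = q_r ∧ o.2 < q_c then d.modify (0, -1) [] (· ++ [o])
  else if o.2 = q_c ∧ o.1 > q_r then d.modify (1, 0) [] (· ++ [o])
  else if o.2 = q_c ∧ o.1 < q_r then d.modify (-1, 0) [] (· ++ [o])
  else if o.2 > q_c ∧ o.1 > q_r then d.modify (1, 1) [] (· ++ [o])
  else if o.2 < q_c ∧ o.1 > q_r then d.modify (1, -1) [] (· ++ [o])
  else if o.2 > q_c ∧ o.1 < q_r then d.modify (-1, 1) [] (· ++ [o])
  else if o.2 < q_c ∧ o.1 < q_r then d.modify (-1, -1) [] (· ++ [o])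
  else d

def partition_obst (q_pos : Int × Int) (obst : List (Int × Int)) : List (Int × Int × List (Int × Int)) :=
  -- obst_by_m = {}; for m in motions: obst_by_m[m] = []
  let d0 := pyMotions.foldl (fun d m => d.insert m ([] : List (Int × Int))) PySem.Dict.empty
  -- for o in obst: <if/elif ladder appending o>
  let d := obst.foldl (stepA q_pos.1 q_pos.2) d0
  -- return obst_by_m  (dict with pair keys rendered as flat triples per the type convention)
  d.items.map (fun p => (p.1.1, p.1.2, p.2))

-- ===== PORT B =====
-- key(o) = ((o[0] > q_r) - (o[0] < q_r), (o[1] > q_c) - (o[1] < q_c))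
def keyB (q_r q_c : Int) (o : Int × Int) : Int × Int :=
  ((if o.1 > q_r then (1 : Int) else 0) - (if o.1 < q_r then (1 : Int) else 0),
   (if o.2 > q_c then (1 : Int) else 0) - (if o.2 < q_c then (1 : Int) else 0))

def partition_obst_alt (q_pos : Int × Int) (obst : List (Int × Int)) : List (Int × Int × List (Int × Int)) :=
  -- {m: [o for o in obst if key(o) == m] for m in motions}  (items as flat triples)
  pyMotions.map (fun m => (m.1, m.2, obst.filter (fun o => keyB q_pos.1 q_pos.2 o == m)))

-- ===== PRECONDITION & SPEC =====
def Spec_partition_obst (q_pos : Int × Int) (obst : List (Int × Int)) (out : List (Int × Int × List (Int × Int))) : Prop := out = partition_obst_alt q_pos obst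
instance (q_pos : Int × Int) (obst : List (Int × Int)) (out : List (Int × Int × List (Int × Int))) : Decidable (Spec_partition_obst q_pos obst out) := by unfold Spec_partition_obst; infer_instance

-- ===== CLAIM (what is proved, stated in full; the proofs are below) =====
def Claim_equal_partition_obst : Prop := ∀ (q_pos : Int × Int) (obst : List (Int × Int)), Dom_partition_obst q_pos obst → Spec_partition_obst q_pos obst (partition_obst q_pos obst)

-- ===== LEMMAS AND PROOFS =====

-- A's ladder appends o to the bucket keyed by B's sign key, and does nothing when o is the queen's square
theorem stepA_eq (q_r q_c : Int) (d : PySem.Dict (Int × Int) (List (Int × Int))) (o : Int × Int) :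
    stepA q_r q_c d o =
      if keyB q_r q_c o = (0, 0) then d
      else d.modify (keyB q_r q_c o) [] (· ++ [o]) := by
  rcases lt_trichotomy o.1 q_r with h1 | h1 | h1 <;>
    rcases lt_trichotomy o.2 q_c with h2 | h2 | h2
  · have e : keyB q_r q_c o = (-1, -1) := by unfold keyB; congr 1 <;> (split_ifs <;> omega)
    rw [e, if_neg (by decide)]
    unfold stepA
    rw [if_neg (by omega), if_neg (by omega), if_neg (by omega), if_neg (by omega),
        if_neg (by omega), if_neg (by omega), if_neg (by omega), if_pos (by omega)]
  · have e : keyB q_r q_c o = (-1, 0) := by unfold keyB; congr 1 <;> (split_ifs <;> omega)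
    rw [e, if_neg (by decide)]
    unfold stepA
    rw [if_neg (by omega), if_neg (by omega), if_neg (by omega), if_pos (by omega)]
  · have e : keyB q_r q_c o = (-1, 1) := by unfold keyB; congr 1 <;> (split_ifs <;> omega)
    rw [e, if_neg (by decide)]
    unfold stepA
    rw [if_neg (by omega), if_neg (by omega), if_neg (by omega), if_neg (by omega),
        if_neg (by omega), if_neg (by omega), if_pos (by omega)]
  · have e : keyB q_r q_c o = (0, -1) := by unfold keyB; congr 1 <;> (split_ifs <;> omega)
    rw [e, if_neg (by decide)]
    unfold stepA
    rw [if_neg (by omega), if_pos (by omega)]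
  · have e : keyB q_r q_c o = (0, 0) := by unfold keyB; congr 1 <;> (split_ifs <;> omega)
    rw [e, if_pos rfl]
    unfold stepA
    rw [if_neg (by omega), if_neg (by omega), if_neg (by omega), if_neg (by omega),
        if_neg (by omega), if_neg (by omega), if_neg (by omega), if_neg (by omega)]
  · have e : keyB q_r q_c o = (0, 1) := by unfold keyB; congr 1 <;> (split_ifs <;> omega)
    rw [e, if_neg (by decide)]
    unfold stepA
    rw [if_pos (by omega)]
  · have e : keyB q_r q_c o = (1, -1) := by unfold keyB; congr 1 <;> (split_ifs <;> omega)
    rw [e, if_neg (by decide)]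
    unfold stepA
    rw [if_neg (by omega), if_neg (by omega), if_neg (by omega), if_neg (by omega),
        if_neg (by omega), if_pos (by omega)]
  · have e : keyB q_r q_c o = (1, 0) := by unfold keyB; congr 1 <;> (split_ifs <;> omega)
    rw [e, if_neg (by decide)]
    unfold stepA
    rw [if_neg (by omega), if_neg (by omega), if_pos (by omega)]
  · have e : keyB q_r q_c o = (1, 1) := by unfold keyB; congr 1 <;> (split_ifs <;> omega)
    rw [e, if_neg (by decide)]
    unfold stepA
    rw [if_neg (by omega), if_neg (by omega), if_neg (by omega), if_neg (by omega),
        if_pos (by omega)]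

-- the sign key is either (0,0) (obstacle on the queen) or one of the eight motions
theorem keyB_cases (q_r q_c : Int) (o : Int × Int) :
    keyB q_r q_c o = (0, 0) ∨ keyB q_r q_c o ∈ pyMotions := by
  unfold keyB pyMotions; split_ifs <;> decide

-- A's obstacle loop never changes the key list when all eight motions are already present
theorem loop_keys (q_r q_c : Int) (obst : List (Int × Int)) :
    ∀ d : PySem.Dict (Int × Int) (List (Int × Int)),
      (∀ m ∈ pyMotions, d.contains m = true) →
      (obst.foldl (stepA q_r q_c) d).keys = d.keys ∧
      (∀ m ∈ pyMotions, (obst.foldl (stepA q_r q_c) d).contains m = true) := by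
  induction obst with
  | nil => exact fun d h => ⟨rfl, h⟩
  | cons o rest ih =>
    intro d h
    have hstep : (stepA q_r q_c d o).keys = d.keys ∧
        (∀ m ∈ pyMotions, (stepA q_r q_c d o).contains m = true) := by
      rw [stepA_eq]
      by_cases hk : keyB q_r q_c o = (0, 0)
      · rw [if_pos hk]; exact ⟨rfl, h⟩
      · rw [if_neg hk]
        have hmem : keyB q_r q_c o ∈ pyMotions := (keyB_cases q_r q_c o).resolve_left hk
        refine ⟨?_, ?_⟩
        · rw [PySem.Dict.keys_modify, PySem.Dict.keys_insert_of_contains]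
          exact h _ hmem
        · intro m hm; rw [PySem.Dict.contains_modify]; simp [h m hm]
    obtain ⟨hk2, hc2⟩ := ih (stepA q_r q_c d o) hstep.2
    exact ⟨by rw [List.foldl_cons, hk2, hstep.1], by rw [List.foldl_cons]; exact hc2⟩

-- the bucket of a direction m accumulates exactly the obstacles whose sign key is m
theorem loop_getD (q_r q_c : Int) (m : Int × Int) (hm : m ≠ (0, 0)) (obst : List (Int × Int)) :
    ∀ d : PySem.Dict (Int × Int) (List (Int × Int)),
      (obst.foldl (stepA q_r q_c) d).getD m [] =
        d.getD m [] ++ obst.filter (fun o => keyB q_r q_c o == m) := by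
  induction obst with
  | nil => intro d; simp
  | cons o rest ih =>
    intro d
    rw [List.foldl_cons, List.filter_cons, ih, stepA_eq]
    by_cases hk : keyB q_r q_c o = (0, 0)
    · rw [if_pos hk]
      have hne : (keyB q_r q_c o == m) = false := by
        rw [hk]; exact beq_false_of_ne (fun h' => hm h'.symm)
      simp [hne]
    · rw [if_neg hk, PySem.Dict.getD_modify]
      by_cases hmk : m = keyB q_r q_c o
      · have ht : (keyB q_r q_c o == m) = true := by simp [hmk]
        simp [hmk]
      · have hf : (keyB q_r q_c o == m) = false := beq_false_of_ne (fun h' => hmk h'.symm)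
        simp [hmk, hf]

-- the initial dict: all eight motion keys, each mapped to []
theorem init_dict :
    pyMotions.foldl (fun d m => d.insert m ([] : List (Int × Int))) PySem.Dict.empty =
      PySem.Dict.mk [((1, 0), []), ((1, 1), []), ((1, -1), []), ((-1, 0), []),
                     ((-1, 1), []), ((-1, -1), []), ((0, 1), []), ((0, -1), [])] := by
  decide

-- every default lookup in the initial dict yields []
theorem init_getD (m : Int × Int) :
    (PySem.Dict.mk [((1, 0), []), ((1, 1), []), ((1, -1), []), ((-1, 0), []),
                    ((-1, 1), []), ((-1, -1), []), ((0, 1), []), ((0, -1), [])]).getD m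
      ([] : List (Int × Int)) = [] := by
  rw [PySem.Dict.getD_eq_get?_getD]
  simp only [PySem.Dict.get?_mk_cons]
  split_ifs <;> rfl

theorem partition_obst_spec : Claim_equal_partition_obst := by
  intro q_pos obst _
  show partition_obst q_pos obst = partition_obst_alt q_pos obst
  simp only [partition_obst, partition_obst_alt]
  rw [init_dict]
  have hc : ∀ m ∈ pyMotions,
      (PySem.Dict.mk [((1, 0), ([] : List (Int × Int))), ((1, 1), []), ((1, -1), []), ((-1, 0), []),
        ((-1, 1), []), ((-1, -1), []), ((0, 1), []), ((0, -1), [])]).contains m = true := by decide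
  obtain ⟨hkeys, -⟩ := loop_keys q_pos.1 q_pos.2 obst _ hc
  have hkeys' : (obst.foldl (stepA q_pos.1 q_pos.2)
      (PySem.Dict.mk [((1, 0), ([] : List (Int × Int))), ((1, 1), []), ((1, -1), []), ((-1, 0), []),
        ((-1, 1), []), ((-1, -1), []), ((0, 1), []), ((0, -1), [])])).keys = pyMotions := by
    rw [hkeys]; decide
  have hnd : (obst.foldl (stepA q_pos.1 q_pos.2)
      (PySem.Dict.mk [((1, 0), ([] : List (Int × Int))), ((1, 1), []), ((1, -1), []), ((-1, 0), []),
        ((-1, 1), []), ((-1, -1), []), ((0, 1), []), ((0, -1), [])])).keys.Nodup := by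
    rw [hkeys']; decide
  rw [PySem.Dict.items_eq_map_keys _ hnd ([] : List (Int × Int)), hkeys', List.map_map]
  refine List.map_congr_left ?_
  intro m hm
  have hm0 : m ≠ (0, 0) := by
    simp only [pyMotions, List.mem_cons, List.not_mem_nil, or_false] at hm
    rcases hm with h' | h' | h' | h' | h' | h' | h' | h' <;> (subst h'; decide)
  simp only [Function.comp]
  rw [loop_getD q_pos.1 q_pos.2 m hm0 obst, init_getD, List.nil_append]
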